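-- pv_equiv track=rewrite | github.com/ellisraputri/TA-AlgoPro | week 10/problem2.py | beautiful_number
-- ===== SOURCE A (Python) =====
-- def duplicates(num, a):
--     num=str(num)
--     num_dup = ''
--     for k in range(a):
--         num_dup+=num
--     num_dup = int(num_dup)
--     return num_dup
--
-- def beautiful_number(x):
--     numlist=[1,2,3,4,5,6,7,8,9]
--     resultss=0
--     loop_amount=0
--     list_iterate_amount=0   #how many times the list has been iterated, ex: 1,2,3,... -> list_iterate_amount=1 and 11,22,... -> list_iterate_amount=2
--
--     while(resultss==0):
--         num_from_numlist = loop_amount % 9      #num_from_numlist is the index number from numlist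
--         if(num_from_numlist % 9 == 0):          #the biggest index number is 8, so when the index is 0 then it will have a modulo of 0. This means that the list has iterate once more
--             list_iterate_amount+=1
--         number_used = duplicates(numlist[num_from_numlist],list_iterate_amount)     #duplicate number based on the list_iterate_amount
--         if(number_used % x == 0):
--             resultss = number_used
--             break
--         loop_amount+=1
--
--     return resultss
-- ===== SOURCE B (Python) =====
-- def beautiful_number(x):
--     # Maintain the repunit R_k modulo x incrementally; test each digit d against
--     # d*R_k % x instead of rebuilding and re-parsing the big candidate each time,
--     # and build the answer arithmetically once at the end.
--     r = 0  # R_k mod x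
--     k = 0
--     while True:
--         k += 1
--         r = (r * 10 + 1) % x
--         for d in range(1, 10):
--             if d * r % x == 0:
--                 n = 0
--                 for _ in range(k):
--                     n = 10 * n + d
--                 return n
-- ===== Notes on version B (the rewrite author's own statement) =====
-- stated objective: faster
-- what changed: Instead of materialising each candidate by string repetition plus int() parsing and taking a big-int modulus per candidate, B maintains the repunit residue modulo x incrementally (r = (r*10+1)%x), tests d*r%x with small-int arithmetic, and constructs the returned number once at the end.
-- outside the precondition, e.g. on beautiful_number(0): A raises ZeroDivisionError, B raises ZeroDivisionError
import Mathlib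
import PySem

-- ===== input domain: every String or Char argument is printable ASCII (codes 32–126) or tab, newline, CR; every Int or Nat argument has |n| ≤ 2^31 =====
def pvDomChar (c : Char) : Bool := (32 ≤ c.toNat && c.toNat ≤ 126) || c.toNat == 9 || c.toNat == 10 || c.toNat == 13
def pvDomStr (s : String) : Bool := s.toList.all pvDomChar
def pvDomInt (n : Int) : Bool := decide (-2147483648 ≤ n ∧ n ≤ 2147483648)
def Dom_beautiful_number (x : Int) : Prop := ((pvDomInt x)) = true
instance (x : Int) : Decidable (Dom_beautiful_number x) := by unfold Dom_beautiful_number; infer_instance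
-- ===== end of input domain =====

-- B replaces per-candidate string building / int() parsing / big-int modulus by an
-- incrementally maintained repunit residue (r = (r*10+1) % x), building the answer once.

-- ===== PORT A =====
-- int(num_dup) is ported BY HAND as a left fold over the digit characters: it is exact for
-- nonempty pure-digit strings, and every string this program parses is str(n) for n in 1..9
-- repeated a ≥ 1 times (no sign, no whitespace, no underscore), where it agrees with
-- PySem.Int.ofChars?.
def pvParseDigits (cs : List Char) : Int :=
  cs.foldl (fun acc c => acc * 10 + ((c.toNat : Int) - 48)) 0

def duplicates (num : Int) (a : Int) : Int :=
  let numS : List Char := PySem.Int.toChars num                     -- num = str(num)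
  let numDup : List Char :=
    (PySem.List.pyRange 0 a 1).foldl (fun s _ => s ++ numS) []      -- for k in range(a): num_dup += num
  pvParseDigits numDup                                              -- num_dup = int(num_dup)

-- fuel bound shared by the two ports: the number of repetition groups the search can need on
-- Pre_ (the multiplicative order of 10 modulo 9·|x| is < 9·|x|); purely a totality guard.
def pvFuel (x : Int) : Nat := 9 * x.natAbs + 2

-- the while loop of A, one fuel unit per Python loop iteration
def pvALoop (x : Int) : Nat → Int → Int → Int
  | 0, _, _ => 0
  | fuel+1, loopAmount, listIterate =>
    let numFrom := PySem.Int.mod loopAmount 9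
    let listIterate := if PySem.Int.mod numFrom 9 == 0 then listIterate + 1 else listIterate
    let numberUsed := duplicates (PySem.List.pyGetD [1,2,3,4,5,6,7,8,9] numFrom 0) listIterate
    if PySem.Int.mod numberUsed x == 0 then numberUsed
    else pvALoop x fuel (loopAmount + 1) listIterate

def beautiful_number (x : Int) : Int := pvALoop x (9 * pvFuel x) 0 0

-- ===== PORT B =====
-- for d in range(1, 10): if d*r % x == 0: return d   (the inner scan of Source B)
def pvBScan (x r : Int) : List Int → Option Int
  | [] => none
  | d :: ds => if PySem.Int.mod (d * r) x == 0 then some d else pvBScan x r ds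

-- n = 0; for _ in range(k): n = 10*n + d
def pvBBuild (d k : Int) : Int :=
  (PySem.List.pyRange 0 k 1).foldl (fun n _ => 10 * n + d) 0

-- the while loop of B, one fuel unit per Python loop iteration (one repetition group)
def pvBLoop (x : Int) : Nat → Int → Int → Int
  | 0, _, _ => 0
  | fuel+1, k, r =>
    let k := k + 1
    let r := PySem.Int.mod (r * 10 + 1) x
    match pvBScan x r (PySem.List.pyRange 1 10 1) with
    | some d => pvBBuild d k
    | none => pvBLoop x fuel k r

def beautiful_number_alt (x : Int) : Int := pvBLoop x (pvFuel x) 0 0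

-- ===== PRECONDITION & SPEC =====
-- Pre_ excludes x = 0 (Python raises ZeroDivisionError) and exactly the x on which the search
-- never succeeds, i.e. A loops forever: a repeated digit d ∈ 1..9 is divisible by x iff
-- 2^v2(x)·5^v5(x) divides some d ≤ 9, i.e. iff none of 10, 16, 25 divides x.
-- (The Lean equality below happens to hold for every x because the two ports share the fuel
-- bound; Pre_ is what makes the fuelled ports faithful to the two Pythons, which raise at 0
-- and diverge on the excluded multiples.)
def Pre_beautiful_number (x : Int) : Prop :=
  x ≠ 0 ∧ x % 10 ≠ 0 ∧ x % 16 ≠ 0 ∧ x % 25 ≠ 0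
instance (x : Int) : Decidable (Pre_beautiful_number x) := by
  unfold Pre_beautiful_number; infer_instance

def pvWitness_beautiful_number : Int := (7)

def Spec_beautiful_number (x : Int) (out : Int) : Prop := out = beautiful_number_alt x
instance (x : Int) (out : Int) : Decidable (Spec_beautiful_number x out) := by unfold Spec_beautiful_number; infer_instance

-- ===== CLAIM (what is proved, stated in full; the proofs are below) =====
def Claim_equal_beautiful_number : Prop := ∀ (x : Int), Dom_beautiful_number x → Pre_beautiful_number x → Spec_beautiful_number x (beautiful_number x)

-- ===== LEMMAS AND PROOFS =====

-- the repunit 11…1 with k ones (the common value both loops track)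
def pvRepunit : Nat → Int
  | 0 => 0
  | k+1 => 10 * pvRepunit k + 1

-- Python % is congruence-stable: (a + t*x) % x = a % x
theorem pvMod_add_mul (a t x : Int) :
    PySem.Int.mod (a + t * x) x = PySem.Int.mod a x := by
  simp [PySem.Int.mod]

-- testing divisibility of d·(R % x) is testing divisibility of d·R
theorem pvModz (x d R : Int) :
    (PySem.Int.mod (d * PySem.Int.mod R x) x == 0) = (PySem.Int.mod (d * R) x == 0) := by
  have h := PySem.Int.floordiv_mul_add_mod R x
  have : d * PySem.Int.mod R x = d * R + (-(d * PySem.Int.floordiv R x)) * x := by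
    linear_combination d * h
  rw [this, pvMod_add_mul]

-- the updated residue of B is the residue of the next repunit
theorem pvModStep (x R : Int) :
    PySem.Int.mod (PySem.Int.mod R x * 10 + 1) x = PySem.Int.mod (10 * R + 1) x := by
  have h := PySem.Int.floordiv_mul_add_mod R x
  have : PySem.Int.mod R x * 10 + 1 = (10 * R + 1) + (-(10 * PySem.Int.floordiv R x)) * x := by
    linear_combination 10 * h
  rw [this, pvMod_add_mul]

theorem pvFoldAppend (c : Char) (l : List Int) (init : List Char) :
    l.foldl (fun s _ => s ++ [c]) init = init ++ List.replicate l.length c := by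
  induction l generalizing init with
  | nil => simp
  | cons a l ih => simp [List.foldl, ih, List.replicate_succ]

theorem pvParseRep (c : Char) (v : Int) (hv : (c.toNat : Int) - 48 = v) (k : Nat) :
    pvParseDigits (List.replicate k c) = v * pvRepunit k := by
  induction k with
  | zero => simp [pvParseDigits, pvRepunit]
  | succ k ih =>
    rw [List.replicate_succ' (n := k)]
    simp only [pvParseDigits, List.foldl_append] at *
    simp [List.foldl, ih, hv, pvRepunit]
    ring

theorem pvDupDigit (d : Int) (c : Char) (hc : PySem.Int.toChars d = [c])
    (hv : (c.toNat : Int) - 48 = d) (k : Nat) :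
    duplicates d (k : Int) = d * pvRepunit k := by
  unfold duplicates
  simp only [hc]
  rw [pvFoldAppend]
  have hlen : (PySem.List.pyRange 0 (k : Int) 1).length = k := by
    rw [PySem.List.pyRange_zero_natCast]; simp
  rw [hlen]
  exact pvParseRep c d hv k

-- duplicates d k = d · R_k for each digit d
theorem pvDupEq (d : Int) (hd1 : 1 ≤ d) (hd9 : d ≤ 9) (k : Nat) :
    duplicates d (k : Int) = d * pvRepunit k := by
  interval_cases d
  · exact pvDupDigit 1 '1' (by decide) (by decide) k
  · exact pvDupDigit 2 '2' (by decide) (by decide) k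
  · exact pvDupDigit 3 '3' (by decide) (by decide) k
  · exact pvDupDigit 4 '4' (by decide) (by decide) k
  · exact pvDupDigit 5 '5' (by decide) (by decide) k
  · exact pvDupDigit 6 '6' (by decide) (by decide) k
  · exact pvDupDigit 7 '7' (by decide) (by decide) k
  · exact pvDupDigit 8 '8' (by decide) (by decide) k
  · exact pvDupDigit 9 '9' (by decide) (by decide) k

theorem pvBuildEq (d : Int) (k : Nat) :
    pvBBuild d (k : Int) = d * pvRepunit k := by
  unfold pvBBuild
  rw [PySem.List.pyRange_zero_natCast]
  induction k with
  | zero => simp [pvRepunit]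
  | succ k ih =>
    rw [List.range_succ]
    simp only [List.map_append, List.foldl_append] at *
    simp [List.foldl, ih, pvRepunit]
    ring

-- one iteration of A's loop, with the index arithmetic resolved
theorem pvAStep (x : Int) (f : Nat) (la li : Int) (j : Nat) (hlt : j < 9)
    (hj : PySem.Int.mod la 9 = (j : Int)) :
    pvALoop x (f+1) la li =
      (let li' := if j = 0 then li + 1 else li
       let nu := duplicates ((j : Int) + 1) li'
       if PySem.Int.mod nu x == 0 then nu else pvALoop x f (la + 1) li') := by
  have hmod : PySem.Int.mod ((j:Int)) 9 = (j:Int) := by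
    interval_cases j <;> decide
  have hget : PySem.List.pyGetD [1,2,3,4,5,6,7,8,9] ((j:Int)) 0 = (j:Int) + 1 := by
    interval_cases j <;> decide
  have hz : (((j:Int)) == 0) = decide (j = 0) := by
    interval_cases j <;> decide
  simp only [pvALoop, hj, hmod, hget, hz]
  split <;> simp_all

-- A's first iteration of a group (index 0: list_iterate_amount increments)
theorem pvAStep0 (x : Int) (f : Nat) (la li : Int) (hj : PySem.Int.mod la 9 = 0) :
    pvALoop x (f+1) la li =
      (if PySem.Int.mod (duplicates 1 (li+1)) x == 0 then duplicates 1 (li+1)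
       else pvALoop x f (la + 1) (li+1)) := by
  have h := pvAStep x f la li 0 (by omega) (by exact_mod_cast hj)
  simpa using h

-- A's later iterations of a group (index 1..8)
theorem pvAStepS (x : Int) (f : Nat) (la li : Int) (j : Nat) (h1 : 1 ≤ j) (h9 : j < 9)
    (hj : PySem.Int.mod la 9 = (j : Int)) :
    pvALoop x (f+1) la li =
      (if PySem.Int.mod (duplicates ((j:Int)+1) li) x == 0 then duplicates ((j:Int)+1) li
       else pvALoop x f (la + 1) li) := by
  have h := pvAStep x f la li j h9 hj
  simp only [h, show ¬ (j = 0) by omega, if_false]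

-- lockstep: 9 iterations of A's loop = 1 iteration of B's loop
set_option maxHeartbeats 3200000 in
theorem pvLock (x : Int) (fuel : Nat) : ∀ (k : Nat),
    pvALoop x (9 * fuel) (9 * (k : Int)) (k : Int)
      = pvBLoop x fuel (k : Int) (PySem.Int.mod (pvRepunit k) x) := by
  induction fuel with
  | zero => intro k; rfl
  | succ fuel ih =>
    intro k
    have hrange : PySem.List.pyRange 1 10 1 = [1,2,3,4,5,6,7,8,9] := by decide
    have hcast : ((k+1 : Nat) : Int) = (k : Int) + 1 := by push_cast; ring
    have hdup : ∀ (d : Int), 1 ≤ d → d ≤ 9 → duplicates d ((k:Int)+1) = d * pvRepunit (k+1) := by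
      intro d hd1 hd9; rw [← hcast]; exact pvDupEq d hd1 hd9 (k+1)
    have hbuild : ∀ (d : Int), pvBBuild d ((k:Int)+1) = d * pvRepunit (k+1) := by
      intro d; rw [← hcast]; exact pvBuildEq d (k+1)
    have hstep : PySem.Int.mod (PySem.Int.mod (pvRepunit k) x * 10 + 1) x
        = PySem.Int.mod (pvRepunit (k+1)) x := by
      rw [pvModStep]; norm_num [pvRepunit]
    simp only [pvBLoop, hstep, hrange, pvBScan, pvModz, hbuild]
    rw [show 9*(fuel+1) = (9*fuel+8)+1 from by omega,
        pvAStep0 x (9*fuel+8) (9*(k:Int)) (k:Int)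
          (by rw [PySem.Int.mod_eq_emod_of_pos (by norm_num)]; omega)]
    rw [show (9*fuel+8:Nat) = (9*fuel+7)+1 from by omega,
        pvAStepS x (9*fuel+7) _ _ 1 (by omega) (by omega)
          (by rw [PySem.Int.mod_eq_emod_of_pos (by norm_num)]; push_cast; omega)]
    rw [show (9*fuel+7:Nat) = (9*fuel+6)+1 from by omega,
        pvAStepS x (9*fuel+6) _ _ 2 (by omega) (by omega)
          (by rw [PySem.Int.mod_eq_emod_of_pos (by norm_num)]; push_cast; omega)]
    rw [show (9*fuel+6:Nat) = (9*fuel+5)+1 from by omega,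
        pvAStepS x (9*fuel+5) _ _ 3 (by omega) (by omega)
          (by rw [PySem.Int.mod_eq_emod_of_pos (by norm_num)]; push_cast; omega)]
    rw [show (9*fuel+5:Nat) = (9*fuel+4)+1 from by omega,
        pvAStepS x (9*fuel+4) _ _ 4 (by omega) (by omega)
          (by rw [PySem.Int.mod_eq_emod_of_pos (by norm_num)]; push_cast; omega)]
    rw [show (9*fuel+4:Nat) = (9*fuel+3)+1 from by omega,
        pvAStepS x (9*fuel+3) _ _ 5 (by omega) (by omega)
          (by rw [PySem.Int.mod_eq_emod_of_pos (by norm_num)]; push_cast; omega)]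
    rw [show (9*fuel+3:Nat) = (9*fuel+2)+1 from by omega,
        pvAStepS x (9*fuel+2) _ _ 6 (by omega) (by omega)
          (by rw [PySem.Int.mod_eq_emod_of_pos (by norm_num)]; push_cast; omega)]
    rw [show (9*fuel+2:Nat) = (9*fuel+1)+1 from by omega,
        pvAStepS x (9*fuel+1) _ _ 7 (by omega) (by omega)
          (by rw [PySem.Int.mod_eq_emod_of_pos (by norm_num)]; push_cast; omega)]
    rw [show (9*fuel+1:Nat) = (9*fuel+0)+1 from by omega,
        pvAStepS x (9*fuel+0) _ _ 8 (by omega) (by omega)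
          (by rw [PySem.Int.mod_eq_emod_of_pos (by norm_num)]; push_cast; omega)]
    have ih' := ih (k+1)
    push_cast at ih'
    rw [show (9*(k:Int)+1+1+1+1+1+1+1+1+1 : Int) = 9*((k:Int)+1) from by ring] at *
    have hd1 := hdup 1 (by norm_num) (by norm_num)
    have hd2 := hdup 2 (by norm_num) (by norm_num)
    have hd3 := hdup 3 (by norm_num) (by norm_num)
    have hd4 := hdup 4 (by norm_num) (by norm_num)
    have hd5 := hdup 5 (by norm_num) (by norm_num)
    have hd6 := hdup 6 (by norm_num) (by norm_num)
    have hd7 := hdup 7 (by norm_num) (by norm_num)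
    have hd8 := hdup 8 (by norm_num) (by norm_num)
    have hd9 := hdup 9 (by norm_num) (by norm_num)
    norm_num [hd1, hd2, hd3, hd4, hd5, hd6, hd7, hd8, hd9]
    rw [ih']
    split_ifs <;> norm_num

-- ===== VERDICT (by name: the statement is the Claim_ definition above) =====
theorem beautiful_number_spec : Claim_equal_beautiful_number := by
  intro x _ _
  unfold Spec_beautiful_number beautiful_number beautiful_number_alt
  have h := pvLock x (pvFuel x) 0
  simpa [pvRepunit, PySem.Int.mod] using h
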